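-- pv_equiv track=rewrite | github.com/skrishna1978/CodingChallenge-February-2019- | 2.8.2019 | returnMissingArray.py | findMissingArraySize
-- ===== SOURCE A (Python) =====
-- def findMissingArraySize(masterArray): #function starts here
--
--     #STEP 1: first we check for all error possibilities.
--     if masterArray is None or len(masterArray) == 0: #if master array is empty or contains no elements
--         return 0  #return 0
--     else: #then we loop inside the array and check size of EACH array
--         for array in masterArray:
--             if array is None or len(array) == 0:  #if any array there is empty
--                 return 0 #return 0
--
--
--     #STEP 2: We load the sizes of all valid arrays into another array
--     arrayLength = [] #to hold sizes of all valid arrays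
--
--     for array in masterArray: #loop through each array in master array
--         arrayLength.append(len(array)) #add the length of each array inside it
--         #loop ends
--     arrayLength = sorted(arrayLength) #sort the array by length
--
--     #STEP 3: Now we check the array of sizes and see which value is missing (since its sorted)
--     loop = 0
--     while loop < len(arrayLength)-1: #loop through the array
--         if arrayLength[loop+1] - arrayLength[loop] > 1: #check neighboring values. does subtracting them give us more than 1?
--             return arrayLength[loop] + 1 #if so, then that is the missing array size in the master array. return it.
--         loop += 1 #else loop on and complete.
-- ===== SOURCE B (Python) =====
-- def findMissingArraySize(masterArray):
--     if masterArray is None or len(masterArray) == 0: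
--         return 0
--     sizes = set()
--     for array in masterArray:
--         if array is None or len(array) == 0:
--             return 0
--         sizes.add(len(array))
--     lo, hi = min(sizes), max(sizes)
--     for v in range(lo + 1, hi):
--         if v not in sizes:
--             return v
--     return None
-- ===== Notes on version B (the rewrite author's own statement) =====
-- stated objective: alternative
-- what changed: B replaces A's sort-then-scan-adjacent-pairs gap search with a hash-set of lengths and a direct membership scan of the integer range between min and max, returning the first absent value.
import Mathlib
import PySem

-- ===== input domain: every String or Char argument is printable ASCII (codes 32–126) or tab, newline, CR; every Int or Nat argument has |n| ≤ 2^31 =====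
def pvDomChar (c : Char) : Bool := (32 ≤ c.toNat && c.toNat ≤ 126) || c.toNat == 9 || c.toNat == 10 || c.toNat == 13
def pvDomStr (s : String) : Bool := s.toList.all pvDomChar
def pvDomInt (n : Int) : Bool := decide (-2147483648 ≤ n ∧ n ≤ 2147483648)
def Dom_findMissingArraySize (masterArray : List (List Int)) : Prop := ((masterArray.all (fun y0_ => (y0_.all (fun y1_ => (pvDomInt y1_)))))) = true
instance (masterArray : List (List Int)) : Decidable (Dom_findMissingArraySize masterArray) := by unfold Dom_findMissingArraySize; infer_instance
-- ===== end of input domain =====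

-- B replaces A's sort-then-adjacent-gap scan with a set of lengths scanned over the range (min, max); alternative algorithm, same results.

-- ===== PORT A =====
-- A's while loop over the sorted length list: index `loop`, condition loop < len-1 (here loop+1 < len; equal over Nat since both false when len = 0).
-- Indices loop and loop+1 are in range under the guard, so getD is exact (no IndexError possible).
def aWhile (l : List Int) (loop : Nat) : Option Int :=
  if _h : loop + 1 < l.length then
    if l.getD (loop + 1) 0 - l.getD loop 0 > 1 then some (l.getD loop 0 + 1)
    else aWhile l (loop + 1)
  else none
termination_by l.length - loop

def findMissingArraySize (masterArray : List (List Int)) : Option Int :=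
  if masterArray.length = 0 then some 0
  else if masterArray.any (fun array => array.length = 0) then some 0
  else
    let arrayLength := masterArray.map (fun array => (array.length : Int))
    let arrayLength := PySem.List.sorted arrayLength (fun x => x) false
    aWhile arrayLength 0

-- ===== PORT B =====
-- B's single loop: early return (none here = Python's `return 0`) on an empty subarray, else add the length to the set.
def bBuild : List (List Int) → PySem.Set Int → Option (PySem.Set Int)
  | [], sizes => some sizes
  | array :: rest, sizes =>
    if array.length = 0 then none
    else bBuild rest (PySem.Set.add sizes (array.length : Int))

def findMissingArraySize_alt (masterArray : List (List Int)) : Option Int :=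
  if masterArray.length = 0 then some 0
  else
    match bBuild masterArray PySem.Set.empty with
    | none => some 0
    | some sizes =>
      -- sizes is nonempty here, so min/max cannot raise; getD 0 is never taken
      let lo := (PySem.List.min? sizes (fun x => x)).getD 0
      let hi := (PySem.List.max? sizes (fun x => x)).getD 0
      (PySem.List.pyRange (lo + 1) hi 1).find? (fun v => !(PySem.Set.contains sizes v))

-- ===== PRECONDITION & SPEC =====
def Spec_findMissingArraySize (masterArray : List (List Int)) (out : Option Int) : Prop := out = findMissingArraySize_alt masterArray
instance (masterArray : List (List Int)) (out : Option Int) : Decidable (Spec_findMissingArraySize masterArray out) := by unfold Spec_findMissingArraySize; infer_instance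

-- ===== CLAIM (what is proved, stated in full; the proofs are below) =====
def Claim_equal_findMissingArraySize : Prop := ∀ (masterArray : List (List Int)), Dom_findMissingArraySize masterArray → Spec_findMissingArraySize masterArray (findMissingArraySize masterArray)


-- ===== LEMMAS AND PROOFS =====

-- A's while loop as a structural scan of adjacent pairs.
def scanA : List Int → Option Int
  | a :: b :: t => if b - a > 1 then some (a + 1) else scanA (b :: t)
  | _ => none

theorem aWhile_eq_scanA (l : List Int) (i : Nat) : aWhile l i = scanA (l.drop i) := by
  rw [aWhile]
  split
  · rename_i h
    have h1 : i < l.length := by omega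
    have e1 : l.getD i 0 = l[i] := by simp [List.getD_eq_getElem?_getD, List.getElem?_eq_getElem h1]
    have e2 : l.getD (i+1) 0 = l[i+1] := by simp [List.getD_eq_getElem?_getD, List.getElem?_eq_getElem h]
    rw [List.drop_eq_getElem_cons h1, List.drop_eq_getElem_cons h, scanA, e1, e2]
    split
    · rfl
    · rw [aWhile_eq_scanA l (i+1), List.drop_eq_getElem_cons h]
  · rename_i h
    have hlen : (l.drop i).length ≤ 1 := by simp; omega
    match hd : l.drop i with
    | [] => simp [scanA]
    | [x] => simp [scanA]
    | x :: y :: t => rw [hd] at hlen; simp at hlen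
termination_by l.length - i

theorem bBuild_none_iff (m : List (List Int)) (s : PySem.Set Int) :
    bBuild m s = none ↔ m.any (fun a => a.length = 0) = true := by
  induction m generalizing s with
  | nil => simp [bBuild]
  | cons a t ih =>
    by_cases h : a.length = 0
    · rw [bBuild, if_pos h]; simp only [List.any_cons]
      simp [List.length_eq_zero_iff.mp h]
    · rw [bBuild, if_neg h]
      simp only [ih, List.any_cons]
      simp [h]

theorem bBuild_some (m : List (List Int)) (s : PySem.Set Int)
    (h : m.any (fun a => a.length = 0) = false) :
    bBuild m s = some ((m.map (fun a => (a.length : Int))).foldl PySem.Set.add s) := by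
  induction m generalizing s with
  | nil => simp [bBuild]
  | cons a t ih =>
    simp only [List.any_cons, Bool.or_eq_false_iff] at h
    have ha : a.length ≠ 0 := by simpa using h.1
    simp [bBuild, ha, ih _ h.2]

theorem find?_congr_mem {α : Type} (l : List α) (p q : α → Bool)
    (h : ∀ x ∈ l, p x = q x) : l.find? p = l.find? q := by
  induction l with
  | nil => rfl
  | cons a t ih =>
    have ha := h a (by simp)
    by_cases hpa : p a = true
    · rw [List.find?_cons_of_pos hpa, List.find?_cons_of_pos (ha ▸ hpa)]
    · rw [List.find?_cons_of_neg hpa, List.find?_cons_of_neg (ha ▸ hpa)]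
      exact ih (fun x hx => h x (List.mem_cons_of_mem _ hx))

theorem pairwise_le_getLast (l : List Int) (hp : l.Pairwise (· ≤ ·)) (hne : l ≠ []) :
    ∀ x ∈ l, x ≤ l.getLast hne := by
  induction l with
  | nil => simp
  | cons a t ih =>
    intro x hx
    cases t with
    | nil => simp at hx; simp [hx]
    | cons b t' =>
      rw [List.getLast_cons (by simp)]
      rcases List.mem_cons.mp hx with rfl | hx'
      · exact le_trans ((List.pairwise_cons.mp hp).1 _ (by simp))
          (ih (List.pairwise_cons.mp hp).2 (by simp) b (by simp))
      · exact ih (List.pairwise_cons.mp hp).2 (by simp) x hx'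

theorem main_scan (t : List Int) (a : Int) (hp : (a :: t).Pairwise (· ≤ ·)) :
    scanA (a :: t) =
      (PySem.List.pyRange (a + 1) ((a :: t).getLast (by simp)) 1).find?
        (fun v => !((a :: t).contains v)) := by
  induction t generalizing a with
  | nil =>
    rw [PySem.List.pyRange_one_eq_nil (by simp : ((a : Int) :: []).getLast (List.cons_ne_nil a []) ≤ a + 1)]
    simp [scanA]
  | cons b t' ih =>
    have hab : a ≤ b := (List.pairwise_cons.mp hp).1 b (by simp)
    have hp' : (b :: t').Pairwise (· ≤ ·) := (List.pairwise_cons.mp hp).2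
    have hble : ∀ x ∈ b :: t', b ≤ x := by
      intro x hx
      rcases List.mem_cons.mp hx with rfl | hx'
      · exact le_refl _
      · exact (List.pairwise_cons.mp hp').1 x hx'
    have hglast : (a :: b :: t').getLast (by simp) = (b :: t').getLast (by simp) :=
      List.getLast_cons (by simp)
    have hz : b ≤ (b :: t').getLast (by simp) := hble _ (List.getLast_mem _)
    rw [hglast]
    by_cases hgt : b - a > 1
    · have hmem : ((a + 1) ∈ a :: b :: t') = False := by
        simp only [List.mem_cons, eq_iff_iff, iff_false]
        rintro (h1 | h2 | h3)
        · omega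
        · omega
        · have := hble _ (List.mem_cons_of_mem _ h3); omega
      have hlt1 : a + 1 < (b :: t').getLast (by simp) := by omega
      rw [show scanA (a :: b :: t') = some (a + 1) by rw [scanA]; simp [hgt]]
      rw [PySem.List.pyRange_one_cons hlt1]
      rw [List.find?_cons_of_pos (by simp [hmem])]
    · have hsc : scanA (a :: b :: t') = scanA (b :: t') := by rw [scanA]; simp; omega
      rw [hsc, ih b hp']
      have hcongr : (PySem.List.pyRange (a + 1) ((b :: t').getLast (by simp)) 1).find?
            (fun v => !((a :: b :: t').contains v))
          = (PySem.List.pyRange (a + 1) ((b :: t').getLast (by simp)) 1).find?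
            (fun v => !((b :: t').contains v)) := by
        apply find?_congr_mem
        intro x hx
        have hxa : a < x := by have := (PySem.List.mem_pyRange_one.mp hx).1; omega
        simp only [List.contains_cons]
        have : (x == a) = false := by simp; omega
        rw [this]; simp
      rw [hcongr]
      have hb2 : b = a ∨ b = a + 1 := by omega
      rcases hb2 with rfl | rfl
      · rfl
      · by_cases hlt : a + 1 < ((a + 1) :: t').getLast (by simp)
        · rw [PySem.List.pyRange_one_cons hlt]
          rw [List.find?_cons_of_neg (by simp)]
        · have hz' : ((a + 1) :: t').getLast (by simp) = a + 1 := le_antisymm (by omega) hz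
          rw [hz']
          rw [PySem.List.pyRange_one_eq_nil (by omega), PySem.List.pyRange_one_eq_nil (by omega)]

-- ===== VERDICT (by name: the statement is the Claim_ definition above) =====
theorem findMissingArraySize_spec : Claim_equal_findMissingArraySize := by
  intro m _
  unfold Spec_findMissingArraySize findMissingArraySize findMissingArraySize_alt
  by_cases h0 : m.length = 0
  · simp [h0]
  · rw [if_neg h0, if_neg h0]
    by_cases hany : m.any (fun a => a.length = 0) = true
    · rw [if_pos hany, (bBuild_none_iff m PySem.Set.empty).mpr hany]
    · have hanyf : m.any (fun a => a.length = 0) = false := Bool.eq_false_iff.mpr hany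
      rw [if_neg hany, bBuild_some m PySem.Set.empty hanyf]
      have hS : (m.map (fun a => ((a.length : Int)))).foldl PySem.Set.add PySem.Set.empty
          = PySem.Set.ofList (m.map (fun a => ((a.length : Int)))) :=
        (PySem.Set.ofList_eq_foldl _).symm
      rw [hS]
      set ns := m.map (fun a => ((a.length : Int))) with hnsdef
      have hns : ns ≠ [] := by
        intro h; apply h0; rw [← List.length_map (f := fun a : List Int => ((a.length : Int))), ← hnsdef, h]; rfl
      have hmemS : ∀ v : Int, v ∈ PySem.Set.ofList ns ↔ v ∈ ns := fun v => PySem.Set.mem_ofList ns v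
      obtain ⟨aH, tH, hsorted⟩ : ∃ aH tH, PySem.List.sorted ns (fun x => x) false = aH :: tH := by
        cases hs : PySem.List.sorted ns (fun x => x) false with
        | nil => exact absurd ((PySem.List.sorted_eq_nil_iff _ _ _).mp hs) hns
        | cons aH tH => exact ⟨aH, tH, rfl⟩
      have hmem_sorted : ∀ v : Int, v ∈ aH :: tH ↔ v ∈ ns := by
        intro v; rw [← hsorted]; exact PySem.List.mem_sorted _ _ _ _
      have hpair : (aH :: tH).Pairwise (· ≤ ·) := by
        have := PySem.List.sorted_pairwise ns (fun x => x)
        rw [hsorted] at this; exact this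
      -- the min of the set is the head of the sorted list
      obtain ⟨m0, hm0⟩ : ∃ m0, PySem.List.min? (PySem.Set.ofList ns) (fun x => x) = some m0 := by
        cases hmo : PySem.List.min? (PySem.Set.ofList ns) (fun x => x) with
        | none =>
          exfalso
          have hempty := (PySem.List.min?_eq_none_iff _ _).mp hmo
          rcases List.exists_mem_of_ne_nil _ hns with ⟨x, hx⟩
          have : x ∈ PySem.Set.ofList ns := (hmemS x).mpr hx
          rw [hempty] at this; simp at this
        | some m0 => exact ⟨m0, rfl⟩
      have hm0a : m0 = aH := by
        have h1 : aH ≤ m0 := PySem.List.key_head_sorted_le ns (fun x => x) hsorted m0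
          ((hmemS m0).mp (PySem.List.min?_mem hm0))
        have h2 : m0 ≤ aH := PySem.List.min?_isMin hm0 aH
          ((hmemS aH).mpr ((hmem_sorted aH).mp (by simp)))
        omega
      -- the max of the set is the last of the sorted list
      obtain ⟨M0, hM0⟩ : ∃ M0, PySem.List.max? (PySem.Set.ofList ns) (fun x => x) = some M0 := by
        cases hmo : PySem.List.max? (PySem.Set.ofList ns) (fun x => x) with
        | none =>
          exfalso
          have hempty := (PySem.List.max?_eq_none_iff _ _).mp hmo
          rcases List.exists_mem_of_ne_nil _ hns with ⟨x, hx⟩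
          have : x ∈ PySem.Set.ofList ns := (hmemS x).mpr hx
          rw [hempty] at this; simp at this
        | some M0 => exact ⟨M0, rfl⟩
      have hM0z : M0 = (aH :: tH).getLast (by simp) := by
        have h1 : M0 ≤ (aH :: tH).getLast (by simp) :=
          pairwise_le_getLast _ hpair (by simp) M0
            ((hmem_sorted M0).mpr ((hmemS M0).mp (PySem.List.max?_mem hM0)))
        have h2 : (aH :: tH).getLast (by simp) ≤ M0 := PySem.List.max?_isMax hM0 _
          ((hmemS _).mpr ((hmem_sorted _).mp (List.getLast_mem _)))
        omega
      show aWhile (PySem.List.sorted ns (fun x => x) false) 0 =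
        (PySem.List.pyRange ((PySem.List.min? (PySem.Set.ofList ns) (fun x => x)).getD 0 + 1)
           ((PySem.List.max? (PySem.Set.ofList ns) (fun x => x)).getD 0) 1).find?
          (fun v => !(PySem.Set.contains (PySem.Set.ofList ns) v))
      rw [hsorted, aWhile_eq_scanA, List.drop_zero, hm0, hM0, main_scan tH aH hpair]
      simp only [Option.getD_some]
      rw [hm0a, hM0z]
      apply find?_congr_mem
      intro x _
      simp [PySem.Set.contains, hmem_sorted x, hmemS x]
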